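-- pv_equiv track=rewrite | github.com/hohuynhnhu/SmallParking---Desktop-App | nhan_dien_ra.py | fix_common_ocr_mistakes
-- ===== SOURCE A (Python) =====
-- def fix_common_ocr_mistakes(text):
--     corrections = {
--         'I': '1',
--         'L': '1',
--         '|': '1',
--         'O': '0',
--         'Q': '0',
--         'S': '5',
--     }
--     for wrong, right in corrections.items():
--         text = text.replace(wrong, right)
--     return text
-- ===== SOURCE B (Python) =====
-- def fix_common_ocr_mistakes(text):
--     corrections = {
--         'I': '1',
--         'L': '1',
--         '|': '1',
--         'O': '0',
--         'Q': '0',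
--         'S': '5',
--     }
--     return ''.join(corrections.get(c, c) for c in text)
-- ===== Notes on version B (the rewrite author's own statement) =====
-- stated objective: idiomatic
-- what changed: Replaces six whole-string str.replace passes by a single character-by-character pass with a per-character dict lookup (safe because no replacement value is itself a key).
import Mathlib
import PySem

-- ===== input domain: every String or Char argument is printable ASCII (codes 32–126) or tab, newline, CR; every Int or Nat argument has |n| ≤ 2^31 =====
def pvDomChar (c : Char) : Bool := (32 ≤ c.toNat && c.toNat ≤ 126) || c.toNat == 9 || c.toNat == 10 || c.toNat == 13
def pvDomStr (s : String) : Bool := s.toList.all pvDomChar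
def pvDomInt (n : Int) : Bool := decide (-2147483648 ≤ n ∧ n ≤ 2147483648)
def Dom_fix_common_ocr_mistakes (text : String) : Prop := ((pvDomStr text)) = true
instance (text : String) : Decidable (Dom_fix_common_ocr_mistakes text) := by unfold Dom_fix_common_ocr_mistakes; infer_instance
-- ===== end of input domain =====

-- B replaces A's six whole-string str.replace passes by one character-by-character pass with a dict lookup (idiomatic single traversal; return value proved equal).


-- ===== PORT A =====
-- six successive whole-string replaces, in the dict's insertion order
def fix_common_ocr_mistakes (text : String) : String :=
  let t1 := PySem.Str.replace text "I" "1"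
  let t2 := PySem.Str.replace t1 "L" "1"
  let t3 := PySem.Str.replace t2 "|" "1"
  let t4 := PySem.Str.replace t3 "O" "0"
  let t5 := PySem.Str.replace t4 "Q" "0"
  let t6 := PySem.Str.replace t5 "S" "5"
  t6

-- ===== PORT B =====
-- ''.join(corrections.get(c, c) for c in text): one pass, one lookup per character
def fix_common_ocr_mistakes_alt (text : String) : String :=
  let corrections : PySem.Dict Char Char :=
    PySem.Dict.ofList [('I', '1'), ('L', '1'), ('|', '1'), ('O', '0'), ('Q', '0'), ('S', '5')]
  String.ofList (text.toList.map (fun c => corrections.getD c c))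

-- ===== PRECONDITION & SPEC =====
def Spec_fix_common_ocr_mistakes (text : String) (out : String) : Prop := out = fix_common_ocr_mistakes_alt text
instance (text : String) (out : String) : Decidable (Spec_fix_common_ocr_mistakes text out) := by unfold Spec_fix_common_ocr_mistakes; infer_instance

-- ===== CLAIM (what is proved, stated in full; the proofs are below) =====
def Claim_equal_fix_common_ocr_mistakes : Prop := ∀ (text : String), Dom_fix_common_ocr_mistakes text → Spec_fix_common_ocr_mistakes text (fix_common_ocr_mistakes text)

-- ===== LEMMAS AND PROOFS =====

-- replace with a single-character pattern is a per-character map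
theorem replace_go_single (a b : Char) :
    ∀ (l : List Char) (fuel : Nat) (acc : List Char), l.length ≤ fuel →
      PySem.Chars.replace.go [a] [b] fuel l acc
        = acc.reverse ++ l.map (fun c => if c = a then b else c) := by
  intro l
  induction l with
  | nil => intro fuel acc _; cases fuel <;> simp [PySem.Chars.replace.go]
  | cons c t ih =>
    intro fuel acc h
    cases fuel with
    | zero => simp at h
    | succ f =>
      simp only [PySem.Chars.replace.go, List.isPrefixOf]
      by_cases hca : c = a
      · subst hca
        have := ih f (b :: acc) (Nat.le_of_succ_le_succ (by simpa using h))
        simpa [List.drop] using this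
      · have hbeq : (a == c) = false := by
          simp [beq_eq_false_iff_ne]; exact fun h' => hca h'.symm
        rw [if_neg (by simp [hbeq])]
        have := ih f (c :: acc) (Nat.le_of_succ_le_succ h)
        simpa [hca] using this

theorem replace_single (a b : Char) (l : List Char) :
    PySem.Chars.replace l [a] [b] = l.map (fun c => if c = a then b else c) := by
  unfold PySem.Chars.replace
  rw [if_neg (by simp)]
  simpa using replace_go_single a b l l.length [] (le_refl _)

-- ===== VERDICT (by name: the statement is the Claim_ definition above) =====
set_option maxHeartbeats 1000000 in
theorem fix_common_ocr_mistakes_spec : Claim_equal_fix_common_ocr_mistakes := by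
  intro text _
  show _ = _
  unfold fix_common_ocr_mistakes fix_common_ocr_mistakes_alt
  have hI : "I".toList = ['I'] := rfl
  have h1 : "1".toList = ['1'] := rfl
  have hL : "L".toList = ['L'] := rfl
  have hP : "|".toList = ['|'] := rfl
  have hO : "O".toList = ['O'] := rfl
  have h0 : "0".toList = ['0'] := rfl
  have hQ : "Q".toList = ['Q'] := rfl
  have hS : "S".toList = ['S'] := rfl
  have h5 : "5".toList = ['5'] := rfl
  simp only [PySem.Str.replace, String.toList_ofList, hI, h1, hL, hP, hO, h0, hQ, hS, h5,
    replace_single, List.map_map]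
  congr 1
  apply List.map_congr_left
  intro c _
  simp only [Function.comp]
  have hd : (PySem.Dict.ofList [('I', '1'), ('L', '1'), ('|', '1'), ('O', '0'), ('Q', '0'), ('S', '5')]
      : PySem.Dict Char Char)
      = PySem.Dict.mk [('I', '1'), ('L', '1'), ('|', '1'), ('O', '0'), ('Q', '0'), ('S', '5')] := by decide
  rcases (show c = 'I' ∨ c = 'L' ∨ c = '|' ∨ c = 'O' ∨ c = 'Q' ∨ c = 'S' ∨
      (c ≠ 'I' ∧ c ≠ 'L' ∧ c ≠ '|' ∧ c ≠ 'O' ∧ c ≠ 'Q' ∧ c ≠ 'S') from by tauto) with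
    h | h | h | h | h | h | ⟨n1, n2, n3, n4, n5, n6⟩
  · subst h; decide
  · subst h; decide
  · subst h; decide
  · subst h; decide
  · subst h; decide
  · subst h; decide
  · rw [hd]
    simp [PySem.Dict.getD, n1, n2, n3, n4, n5, n6,
      Ne.symm n1, Ne.symm n2, Ne.symm n3, Ne.symm n4, Ne.symm n5, Ne.symm n6, PySem.Dict.get?]
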